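-- pv_equiv track=rewrite | github.com/alexjps1/cs210 | proj/boggle/boggler.py | search
-- ===== SOURCE A (Python) =====
-- NOPE = "Nope"       # Not a match, nor a prefix of a match
--
-- MATCH = "Match"     # Exact match to a valid word
--
-- PREFIX ="Prefix"   # Not an exact match, but a prefix (keep searching!)
--
-- def search(candidate: str, word_list: list[str]) -> str:
--     """Determine whether candidate is a MATCH, a PREFIX of a match, or a big NOPE
--     Note word list MUST be in sorted order.
--
--     >>> search("ALPHA", ['ALPHA', 'BETA', 'GAMMA']) == MATCH
--     True
--
--     >>> search("BE", ['ALPHA', 'BETA', 'GAMMA']) == PREFIX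
--     True
--
--     >>> search("FOX", ['ALPHA', 'BETA', 'GAMMA']) == NOPE
--     True
--
--     >>> search("ZZZZ", ['ALPHA', 'BETA', 'GAMMA']) == NOPE
--     True
--     """
--     low = 0
--     high = len(word_list) - 1
--     while high >= low:
--         mid = (high + low) // 2
--         if candidate == word_list[mid]:
--             return MATCH
--         elif candidate > word_list[mid]:
--             low = mid + 1
--         elif candidate < word_list[mid]:
--             high = mid - 1
--         # check whether substring
--     if low < len(word_list) and word_list[low].startswith(candidate):
--         return PREFIX
--     else:
--         return NOPE
-- ===== SOURCE B (Python) =====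
-- NOPE = "Nope"
-- MATCH = "Match"
-- PREFIX = "Prefix"
--
-- def search(candidate: str, word_list: list[str]) -> str:
--     if candidate in word_list:
--         return MATCH
--     if any(w.startswith(candidate) for w in word_list):
--         return PREFIX
--     return NOPE
-- ===== Notes on version B (the rewrite author's own statement) =====
-- stated objective: simpler
-- what changed: Replaces the hand-written binary search (match-during-search plus post-loop prefix probe of a single element) by two flat scans with no search at all: a membership test, then an any-startswith pass; on a sorted list the element A's loop lands on starts with the candidate iff some element does, which the proof establishes as a lexicographic-order lemma.
-- outside the precondition, e.g. on search('A', ['B', 'A']): A returns 'Nope', B returns 'Match'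
import Mathlib
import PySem

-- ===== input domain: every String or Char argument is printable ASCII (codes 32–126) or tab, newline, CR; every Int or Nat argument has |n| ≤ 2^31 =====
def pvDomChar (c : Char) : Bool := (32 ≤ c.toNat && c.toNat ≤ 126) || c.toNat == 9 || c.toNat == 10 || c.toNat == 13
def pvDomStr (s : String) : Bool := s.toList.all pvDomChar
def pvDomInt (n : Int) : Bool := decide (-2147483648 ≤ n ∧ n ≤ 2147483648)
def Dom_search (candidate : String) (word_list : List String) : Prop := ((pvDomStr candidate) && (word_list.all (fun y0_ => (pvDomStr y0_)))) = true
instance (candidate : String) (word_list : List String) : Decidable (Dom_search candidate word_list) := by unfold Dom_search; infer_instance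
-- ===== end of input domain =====

-- B replaces A's hand-written binary search by two flat scans (membership test, then an
-- any-startswith pass) — no search at all; simpler, proved equal on sorted lists.


-- ===== PORT A =====
-- A's while-loop: the window [low, high] shrinks each iteration; word_list[mid] is always
-- in range when reached from search (0 ≤ low ≤ mid ≤ high < length), so pyGetD is exact there.
def searchLoop (candidate : String) (word_list : List String) (low high : Int) : String :=
  if hlh : high ≥ low then
    if candidate = PySem.List.pyGetD word_list (PySem.Int.floordiv (high + low) 2) "" then "Match"
    else if PySem.List.pyGetD word_list (PySem.Int.floordiv (high + low) 2) "" < candidate then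
      searchLoop candidate word_list (PySem.Int.floordiv (high + low) 2 + 1) high
    else
      searchLoop candidate word_list low (PySem.Int.floordiv (high + low) 2 - 1)
  else if low < (word_list.length : Int) ∧
          PySem.Str.startswith (PySem.List.pyGetD word_list low "") candidate then "Prefix"
  else "Nope"
termination_by (high - low + 1).toNat
decreasing_by
  · have hb := PySem.Int.floordiv_two_mid_bounds (lo := low) (hi := high) hlh
    rw [add_comm low high] at hb
    omega
  · have hb := PySem.Int.floordiv_two_mid_bounds (lo := low) (hi := high) hlh
    rw [add_comm low high] at hb
    omega

def search (candidate : String) (word_list : List String) : String :=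
  searchLoop candidate word_list 0 ((word_list.length : Int) - 1)

-- ===== PORT B =====
def search_alt (candidate : String) (word_list : List String) : String :=
  if candidate ∈ word_list then "Match"
  else if word_list.any (fun w => PySem.Str.startswith w candidate) then "Prefix"
  else "Nope"

-- ===== PRECONDITION & SPEC =====
-- Pre_ excludes unsorted word lists in which the candidate equals or prefixes some element:
-- there A's binary-search answer is an accident of which elements the probes happen to hit
-- (the docstring says the list MUST be sorted); when the candidate is unrelated to every
-- element, order cannot matter (both programs answer "Nope"), so those inputs are kept.
def Pre_search (candidate : String) (word_list : List String) : Prop :=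
  List.Pairwise (fun a b => a.toList ≤ b.toList) word_list ∨
    (candidate ∉ word_list ∧ ∀ w ∈ word_list, PySem.Str.startswith w candidate = false)
instance (candidate : String) (word_list : List String) : Decidable (Pre_search candidate word_list) := by unfold Pre_search; infer_instance

def pvWitness_search : String × List String := ("BE", ["ALPHA", "BETA", "GAMMA"])

def Spec_search (candidate : String) (word_list : List String) (out : String) : Prop := out = search_alt candidate word_list
instance (candidate : String) (word_list : List String) (out : String) : Decidable (Spec_search candidate word_list out) := by unfold Spec_search; infer_instance

-- ===== CLAIM (what is proved, stated in full; the proofs are below) =====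
def Claim_equal_search : Prop := ∀ (candidate : String) (word_list : List String), Dom_search candidate word_list → Pre_search candidate word_list → Spec_search candidate word_list (search candidate word_list)

-- ===== LEMMAS AND PROOFS =====

-- number of list elements strictly below the candidate (where A's loop window closes)
def cnt (c : String) (ls : List String) : Nat := ls.countP (fun w => decide (w < c))

-- the common value both programs compute on a sorted list
def target (c : String) (ls : List String) : String :=
  if c ∈ ls then "Match"
  else if cnt c ls < ls.length ∧ PySem.Str.startswith (ls.getD (cnt c ls) "") c then "Prefix"
  else "Nope"

theorem sorted_mono {ls : List String} (hs : List.Pairwise (fun a b => a.toList ≤ b.toList) ls)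
    {i j : Nat} (hij : i ≤ j) (hj : j < ls.length) : ls[i]'(lt_of_le_of_lt hij hj) ≤ ls[j] := by
  rcases Nat.lt_or_ge i j with h | h
  · exact String.le_iff_toList_le.mpr ((List.pairwise_iff_getElem.mp hs) i j _ hj h)
  · have : i = j := le_antisymm hij h
    subst this; exact le_refl _

theorem cnt_le_length (c : String) (ls : List String) : cnt c ls ≤ ls.length :=
  List.countP_le_length

-- characterisation: on a sorted list, ls[i] < c exactly for the first (cnt c ls) indices
theorem cnt_char {c : String} {ls : List String}
    (hs : List.Pairwise (fun a b => a.toList ≤ b.toList) ls) :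
    ∀ i (hi : i < ls.length), (ls[i] < c ↔ i < cnt c ls) := by
  induction ls with
  | nil => intro i hi; simp at hi
  | cons a tl ih =>
    obtain ⟨ha', htl⟩ := List.pairwise_cons.mp hs
    have ha : ∀ x ∈ tl, a ≤ x := fun x hx => String.le_iff_toList_le.mpr (ha' x hx)
    intro i hi
    have hcons : cnt c (a :: tl) = cnt c tl + (if a < c then 1 else 0) := by
      simp [cnt, List.countP_cons]
    by_cases hac : a < c
    · cases i with
      | zero => simpa [hcons, hac] using Nat.succ_pos _
      | succ k =>
        have hk : k < tl.length := by simpa using hi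
        have hih := ih htl k hk
        simpa [hcons, hac, Nat.succ_lt_succ_iff] using hih
    · have hzero : cnt c tl = 0 := by
        rw [cnt, List.countP_eq_zero]
        intro x hx
        simp only [decide_eq_true_eq]
        exact fun hlt => hac (lt_of_le_of_lt (ha x hx) hlt)
      cases i with
      | zero => simp [hcons, hac, hzero, List.getElem_cons_zero]
      | succ k =>
        have hk : k < tl.length := by simpa using hi
        have hx : tl[k] ∈ tl := List.getElem_mem hk
        have hcons0 : cnt c (a :: tl) = 0 := by rw [hcons, hzero]; simp [hac]
        simp only [List.getElem_cons_succ, hcons0]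
        constructor
        · intro hlt; exact absurd (lt_of_le_of_lt (ha _ hx) hlt) hac
        · intro h; exact absurd h (by omega)

theorem cnt_eq_of_split {c : String} {ls : List String}
    (hs : List.Pairwise (fun a b => a.toList ≤ b.toList) ls)
    {lo : Nat} (hlo : lo ≤ ls.length)
    (hbelow : ∀ i (hi : i < ls.length), i < lo → ls[i] < c)
    (habove : ∀ i (hi : i < ls.length), lo ≤ i → ¬ ls[i] < c) :
    cnt c ls = lo := by
  rcases Nat.lt_trichotomy (cnt c ls) lo with h | h | h
  · have hi : cnt c ls < ls.length := lt_of_lt_of_le h hlo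
    have := hbelow _ hi h
    have := (cnt_char hs _ hi).mp this
    omega
  · exact h
  · have hi : lo < ls.length := lt_of_lt_of_le h (cnt_le_length c ls)
    have := (cnt_char hs _ hi).mpr h
    exact absurd this (habove _ hi le_rfl)

theorem not_mem_of_split {c : String} {ls : List String} {low high : Int}
    (hbelow : ∀ i (hi : i < ls.length), (i : Int) < low → ls[i] < c)
    (habove : ∀ i (hi : i < ls.length), high < (i : Int) → c < ls[i])
    (hlh : high < low) : c ∉ ls := by
  intro hmem
  obtain ⟨i, hi, hEq⟩ := List.mem_iff_getElem.mp hmem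
  rcases lt_or_ge (i : Int) low with h | h
  · exact absurd (hbelow i hi h) (by rw [hEq]; exact lt_irrefl c)
  · exact absurd (habove i hi (lt_of_lt_of_le hlh h)) (by rw [hEq]; exact lt_irrefl c)

theorem searchLoop_exit {c : String} {ls : List String} {low high : Int}
    (hs : List.Pairwise (fun a b => a.toList ≤ b.toList) ls)
    (hlh : high < low) (h0 : 0 ≤ low) (hlen : low ≤ (ls.length : Int))
    (hbelow : ∀ i (hi : i < ls.length), (i : Int) < low → ls[i] < c)
    (habove : ∀ i (hi : i < ls.length), high < (i : Int) → c < ls[i]) :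
    searchLoop c ls low high = target c ls := by
  rw [searchLoop]
  rw [dif_neg (by omega)]
  have hnm : c ∉ ls := not_mem_of_split hbelow habove hlh
  have hcnt : cnt c ls = low.toNat := by
    refine cnt_eq_of_split hs (by omega) ?_ ?_
    · intro i hi h; exact hbelow i hi (by omega)
    · intro i hi h
      exact fun hlt => absurd hlt (not_lt_of_gt (habove i hi (by omega)))
  rw [target, if_neg hnm, hcnt]
  by_cases hrange : low < (ls.length : Int)
  · have hg : PySem.List.pyGetD ls low "" = ls[low.toNat]'(by omega) :=
      PySem.List.pyGetD_eq_getElem ls "" h0 hrange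
    rw [hg]
    have hget : ls.getD low.toNat "" = ls[low.toNat]'(by omega) := List.getD_eq_getElem ls _ (by omega)
    rw [hget]
    by_cases hsw : PySem.Str.startswith (ls[low.toNat]'(by omega)) c = true
    · rw [if_pos ⟨hrange, hsw⟩, if_pos ⟨by omega, hsw⟩]
    · rw [if_neg (by rintro ⟨_, h⟩; exact hsw h), if_neg (by rintro ⟨_, h⟩; exact hsw h)]
  · rw [if_neg (by rintro ⟨h, _⟩; exact hrange h), if_neg (by rintro ⟨h, _⟩; omega)]

-- A's loop computes `target` under the standard binary-search invariant
theorem searchLoop_eq {c : String} {ls : List String}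
    (hs : List.Pairwise (fun a b => a.toList ≤ b.toList) ls) :
    ∀ (fuel : Nat) (low high : Int), (high - low + 1).toNat ≤ fuel →
      0 ≤ low → low ≤ (ls.length : Int) → high < (ls.length : Int) →
      (∀ i (hi : i < ls.length), (i : Int) < low → ls[i] < c) →
      (∀ i (hi : i < ls.length), high < (i : Int) → c < ls[i]) →
      searchLoop c ls low high = target c ls := by
  intro fuel
  induction fuel with
  | zero =>
    intro low high hfuel h0 hlen hhigh hbelow habove
    exact searchLoop_exit hs (by omega) h0 hlen hbelow habove
  | succ fuel ih =>
    intro low high hfuel h0 hlen hhigh hbelow habove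
    by_cases hlh : high ≥ low
    · have hmid := PySem.Int.floordiv_two_mid_bounds (lo := low) (hi := high) hlh
      rw [add_comm low high] at hmid
      set mid := PySem.Int.floordiv (high + low) 2 with hmiddef
      have hmr : mid < (ls.length : Int) := by omega
      have hm0 : 0 ≤ mid := by omega
      have hg : PySem.List.pyGetD ls mid "" = ls[mid.toNat]'(by omega) :=
        PySem.List.pyGetD_eq_getElem ls "" hm0 hmr
      rw [searchLoop, dif_pos hlh, ← hmiddef, hg]
      by_cases heq : c = ls[mid.toNat]'(by omega)
      · rw [if_pos heq, target, if_pos (heq ▸ List.getElem_mem _)]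
      · rw [if_neg heq]
        by_cases hlt : ls[mid.toNat]'(by omega) < c
        · rw [if_pos hlt]
          refine ih (mid + 1) high (by omega) (by omega) (by omega) hhigh ?_ habove
          intro i hi h
          calc ls[i] ≤ ls[mid.toNat]'(by omega) := sorted_mono hs (by omega) (by omega)
            _ < c := hlt
        · rw [if_neg hlt]
          have hgt : c < ls[mid.toNat]'(by omega) :=
            lt_of_le_of_ne (le_of_not_gt hlt) heq
          refine ih low (mid - 1) (by omega) h0 hlen (by omega) hbelow ?_
          intro i hi h
          calc c < ls[mid.toNat]'(by omega) := hgt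
            _ ≤ ls[i] := sorted_mono hs (by omega) hi
    · exact searchLoop_exit hs (by omega) h0 hlen hbelow habove

-- lexicographic order facts used to relate B's any-startswith scan to A's single probe

theorem prefix_le {c w : List Char} (h : c <+: w) : c ≤ w := by
  induction c generalizing w with
  | nil =>
    cases w with
    | nil => exact le_refl _
    | cons b w' => exact le_of_lt (List.nil_lt_cons b w')
  | cons a c' ih =>
    obtain ⟨t, ht⟩ := h
    cases w with
    | nil => simp at ht
    | cons b w' =>
      have hab : a = b := by simpa using congrArg (fun l => l.head?) ht
      have htail : c' <+: w' := ⟨t, by simpa [hab] using congrArg List.tail ht⟩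
      subst hab
      rcases lt_or_eq_of_le (ih htail) with h' | h'
      · exact le_of_lt (List.cons_lt_cons_iff.mpr (Or.inr ⟨rfl, h'⟩))
      · exact le_of_eq (by rw [h'])

-- the heart of the equivalence: any element lexicographically between the candidate and
-- some extension of the candidate is itself an extension of the candidate
theorem prefix_between {c x w : List Char} (hcx : c ≤ x) (hxw : x ≤ w) (h : c <+: w) :
    c <+: x := by
  induction c generalizing x w with
  | nil => exact List.nil_prefix
  | cons a c' ih =>
    obtain ⟨t, ht⟩ := h
    cases w with
    | nil => simp at ht
    | cons b w' =>
      have hab : a = b := by simpa using congrArg (fun l => l.head?) ht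
      subst hab
      have htail : c' <+: w' := ⟨t, by simpa using congrArg List.tail ht⟩
      cases x with
      | nil =>
        exact absurd (lt_of_lt_of_le (List.nil_lt_cons a c') hcx) (lt_irrefl _)
      | cons e x' =>
        have hea : e = a := by
          by_contra hne
          rcases lt_or_gt_of_ne hne with hlt | hgt
          · exact absurd (List.cons_lt_cons_iff.mpr (Or.inl hlt))
              (not_lt.mpr hcx)
          · exact absurd (List.cons_lt_cons_iff.mpr (Or.inl hgt))
              (not_lt.mpr hxw)
        subst hea
        have hcx' : c' ≤ x' :=
          not_lt.mp (fun h' => (not_lt.mpr hcx) (List.cons_lt_cons_iff.mpr (Or.inr ⟨rfl, h'⟩)))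
        have hxw' : x' ≤ w' :=
          not_lt.mp (fun h' => (not_lt.mpr hxw) (List.cons_lt_cons_iff.mpr (Or.inr ⟨rfl, h'⟩)))
        exact List.cons_prefix_cons.mpr ⟨rfl, ih hcx' hxw' htail⟩

-- B's two flat scans compute `target` on a sorted list
theorem search_alt_eq_target {c : String} {ls : List String}
    (hs : List.Pairwise (fun a b => a.toList ≤ b.toList) ls) :
    search_alt c ls = target c ls := by
  rw [search_alt, target]
  by_cases hmem : c ∈ ls
  · rw [if_pos hmem, if_pos hmem]
  · rw [if_neg hmem, if_neg hmem]
    by_cases hany : ls.any (fun w => PySem.Str.startswith w c) = true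
    · -- some element extends c; show the element at index cnt does too
      obtain ⟨w, hw, hsw⟩ := List.any_eq_true.mp hany
      obtain ⟨j, hj, hEq⟩ := List.mem_iff_getElem.mp hw
      have hpw : c.toList <+: w.toList := by
        have := PySem.Str.startswith_eq w c
        rw [this] at hsw
        exact (PySem.Chars.startswith_iff _ _).mp hsw
      have hcw : c ≤ w := String.le_iff_toList_le.mpr (prefix_le hpw)
      have hjc : ¬ ls[j] < c := by rw [hEq]; exact not_lt.mpr hcw
      have hcle : cnt c ls ≤ j := by
        by_contra h
        exact hjc ((cnt_char hs j hj).mpr (by omega))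
      have hlt : cnt c ls < ls.length := lt_of_le_of_lt hcle hj
      have hx1 : c ≤ ls[cnt c ls] :=
        not_lt.mp (fun hh => absurd ((cnt_char hs _ hlt).mp hh) (lt_irrefl _))
      have hx2 : ls[cnt c ls] ≤ ls[j] := sorted_mono hs hcle hj
      rw [hEq] at hx2
      have hpx : c.toList <+: (ls[cnt c ls]).toList :=
        prefix_between (String.le_iff_toList_le.mp hx1) (String.le_iff_toList_le.mp hx2) hpw
      have hswx : PySem.Str.startswith (ls[cnt c ls]) c = true := by
        rw [PySem.Str.startswith_eq]
        exact (PySem.Chars.startswith_iff _ _).mpr hpx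
      rw [if_pos hany, if_pos ⟨hlt, by rw [List.getD_eq_getElem ls _ hlt]; exact hswx⟩]
    · -- no element extends c, in particular the one at index cnt does not
      have h2 : ¬ (cnt c ls < ls.length ∧ PySem.Str.startswith (ls.getD (cnt c ls) "") c = true) := by
        rintro ⟨hlt, hsw⟩
        rw [List.getD_eq_getElem ls _ hlt] at hsw
        exact hany (List.any_eq_true.mpr ⟨ls[cnt c ls], List.getElem_mem hlt, hsw⟩)
      rw [if_neg hany, if_neg h2]

-- when the candidate equals or prefixes no element, order cannot matter: A answers "Nope"
theorem searchLoop_unrelated {c : String} {ls : List String}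
    (hnm : c ∉ ls) (hns : ∀ w ∈ ls, PySem.Str.startswith w c = false) :
    ∀ (fuel : Nat) (low high : Int), (high - low + 1).toNat ≤ fuel →
      0 ≤ low → high < (ls.length : Int) →
      searchLoop c ls low high = "Nope" := by
  intro fuel
  induction fuel with
  | zero =>
    intro low high hfuel h0 hhigh
    rw [searchLoop, dif_neg (by omega)]
    by_cases hrange : low < (ls.length : Int)
    · rw [PySem.List.pyGetD_eq_getElem ls "" h0 hrange]
      rw [if_neg (by rintro ⟨_, h⟩; have hf := hns _ (List.getElem_mem (n := low.toNat) (by omega)); rw [h] at hf; exact Bool.noConfusion hf)]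
    · rw [if_neg (by rintro ⟨h, _⟩; exact hrange h)]
  | succ fuel ih =>
    intro low high hfuel h0 hhigh
    by_cases hlh : high ≥ low
    · have hmid := PySem.Int.floordiv_two_mid_bounds (lo := low) (hi := high) hlh
      rw [add_comm low high] at hmid
      set mid := PySem.Int.floordiv (high + low) 2 with hmiddef
      have hg : PySem.List.pyGetD ls mid "" = ls[mid.toNat]'(by omega) :=
        PySem.List.pyGetD_eq_getElem ls "" (by omega) (by omega)
      rw [searchLoop, dif_pos hlh, ← hmiddef, hg]
      rw [if_neg (fun hEq => hnm (by rw [hEq]; exact List.getElem_mem (by omega)))]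
      by_cases hlt : ls[mid.toNat]'(by omega) < c
      · rw [if_pos hlt]; exact ih (mid + 1) high (by omega) (by omega) hhigh
      · rw [if_neg hlt]; exact ih low (mid - 1) (by omega) h0 (by omega)
    · rw [searchLoop, dif_neg (by omega)]
      by_cases hrange : low < (ls.length : Int)
      · rw [PySem.List.pyGetD_eq_getElem ls "" h0 hrange]
        rw [if_neg (by rintro ⟨_, h⟩; have hf := hns _ (List.getElem_mem (n := low.toNat) (by omega)); rw [h] at hf; exact Bool.noConfusion hf)]
      · rw [if_neg (by rintro ⟨h, _⟩; exact hrange h)]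

theorem search_alt_unrelated {c : String} {ls : List String}
    (hnm : c ∉ ls) (hns : ∀ w ∈ ls, PySem.Str.startswith w c = false) :
    search_alt c ls = "Nope" := by
  rw [search_alt, if_neg hnm]
  rw [if_neg (by
    intro hany
    obtain ⟨w, hw, hsw⟩ := List.any_eq_true.mp hany
    have := hns w hw
    rw [hsw] at this
    exact Bool.noConfusion this)]

-- ===== VERDICT (by name: the statement is the Claim_ definition above) =====
theorem search_spec : Claim_equal_search := by
  intro candidate word_list _hdom hpre
  unfold Spec_search
  rcases hpre with hpre | ⟨hnm, hns⟩
  · rw [search_alt_eq_target hpre, search]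
    refine searchLoop_eq hpre word_list.length 0 ((word_list.length : Int) - 1)
      (by omega) le_rfl (by omega) (by omega) ?_ ?_
    · intro i hi h; omega
    · intro i hi h; omega
  · rw [search_alt_unrelated hnm hns, search]
    exact searchLoop_unrelated hnm hns word_list.length 0 _ (by omega) le_rfl (by omega)
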